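-- pv_equiv track=rewrite | github.com/DanielKnaub/homeworks | 6.02/33191/task19.py | f
-- ===== SOURCE A (Python) =====
-- def f(x, y, h):
--     if h == 3 and x+y >= 91:
--         return 1
--     elif h == 3 and x+y < 91:
--         return 0
--     elif x+y >= 91 and h < 3:
--         return 0
--     else:
--         if h % 2 == 0:
--             return f(x+1, y, h+1) or f(x, y+1, h+1) or f(x*4, y, h+1) or f(x, y*4, h+1)
--         else:
--             return f(x+1, y, h+1) or f(x, y+1, h+1) or f(x*4, y, h+1) or f(x, y*4, h+1)
-- ===== SOURCE B (Python) =====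
-- def f(x, y, h):
--     stack = [(x, y, h)]
--     while stack:
--         a, b, d = stack.pop()
--         s = a + b
--         if d == 3:
--             if s >= 91:
--                 return 1
--         elif s < 91:
--             stack.extend([(a, b * 4, d + 1), (a * 4, b, d + 1),
--                           (a, b + 1, d + 1), (a + 1, b, d + 1)])
--     return 0
-- ===== Notes on version B (the rewrite author's own statement) =====
-- stated objective: alternative
-- what changed: Replaces A's depth-first recursion with short-circuit 'or' by an iterative loop over an explicit stack of (x,y,depth) states that prunes states with sum>=91 before depth 3 and returns 1 on the first depth-3 state with sum>=91.
import Mathlib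
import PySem

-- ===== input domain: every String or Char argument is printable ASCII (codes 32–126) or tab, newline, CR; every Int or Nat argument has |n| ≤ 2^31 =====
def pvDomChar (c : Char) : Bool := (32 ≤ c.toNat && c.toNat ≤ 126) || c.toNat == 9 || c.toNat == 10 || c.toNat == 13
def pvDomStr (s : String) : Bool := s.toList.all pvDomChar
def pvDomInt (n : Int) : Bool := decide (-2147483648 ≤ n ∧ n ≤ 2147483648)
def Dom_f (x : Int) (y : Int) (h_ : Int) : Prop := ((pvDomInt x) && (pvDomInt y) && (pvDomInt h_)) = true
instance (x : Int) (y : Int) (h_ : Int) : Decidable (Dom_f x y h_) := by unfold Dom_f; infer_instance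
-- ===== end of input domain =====

-- B replaces A's depth-first short-circuit recursion by an iterative loop over an explicit
-- stack with the same pruning and early exit; alternative decomposition, same cost.


-- ===== PORT A =====
-- Python 'a or b' on int values: returns a if a is truthy (≠ 0), else b
def pyOr (a b : Int) : Int := if a ≠ 0 then a else b

-- A's recursion, fuel-indexed: fuel (3 - h).toNat + 1 covers every call when h ≤ 3;
-- at fuel 0 (reachable only for h > 3, where Python recurses forever) we return 0, outside Pre_f.
def fAux (x y h_ : Int) : Nat → Int
  | 0 => 0
  | n + 1 =>
    if h_ = 3 ∧ x + y ≥ 91 then 1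
    else if h_ = 3 ∧ x + y < 91 then 0
    else if x + y ≥ 91 ∧ h_ < 3 then 0
    else if PySem.Int.mod h_ 2 = 0 then
      pyOr (fAux (x+1) y (h_+1) n) (pyOr (fAux x (y+1) (h_+1) n)
        (pyOr (fAux (x*4) y (h_+1) n) (fAux x (y*4) (h_+1) n)))
    else
      pyOr (fAux (x+1) y (h_+1) n) (pyOr (fAux x (y+1) (h_+1) n)
        (pyOr (fAux (x*4) y (h_+1) n) (fAux x (y*4) (h_+1) n)))

def f (x : Int) (y : Int) (h_ : Int) : Int := fAux x y h_ ((3 - h_).toNat + 1)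

-- ===== PORT B =====
-- B's 'while stack:' loop; the list head is the stack top (list.pop / extend order preserved:
-- the last element of the Python extend is pushed as the head). The Nat fuel only totalizes
-- the same loop — it bounds the number of iterations and runs out only for h > 3 (outside
-- Pre_f), where Python B's stack grows forever.
def fStack : Nat → List (Int × Int × Int) → Int
  | _, [] => 0
  | 0, _ :: _ => 0
  | n + 1, (a, b, d) :: rest =>
    if d = 3 then
      if a + b ≥ 91 then 1 else fStack n rest
    else if a + b < 91 then
      fStack n ((a+1, b, d+1) :: (a, b+1, d+1) :: (a*4, b, d+1) :: (a, b*4, d+1) :: rest)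
    else
      fStack n rest

def f_alt (x : Int) (y : Int) (h_ : Int) : Int :=
  fStack (5 ^ (4 - h_).toNat) [(x, y, h_)]

-- ===== PRECONDITION & SPEC =====
-- Pre_f excludes exactly h > 3, where A recurses forever (every branch calls f with h+1 and
-- the h == 3 base cases are never reached) until Python's RecursionError.
def Pre_f (x : Int) (y : Int) (h_ : Int) : Prop := h_ ≤ 3
instance (x : Int) (y : Int) (h_ : Int) : Decidable (Pre_f x y h_) := by unfold Pre_f; infer_instance
def pvWitness_f : Int × Int × Int := (0, 0, 0)

def Spec_f (x : Int) (y : Int) (h_ : Int) (out : Int) : Prop := out = f_alt x y h_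
instance (x : Int) (y : Int) (h_ : Int) (out : Int) : Decidable (Spec_f x y h_ out) := by unfold Spec_f; infer_instance

-- ===== CLAIM (what is proved, stated in full; the proofs are below) =====
def Claim_equal_f : Prop := ∀ (x : Int) (y : Int) (h_ : Int), Dom_f x y h_ → Pre_f x y h_ → Spec_f x y h_ (f x y h_)

-- per-entry fuel cost for the stack loop
def entryCost (e : Int × Int × Int) : Nat := 5 ^ (4 - e.2.2).toNat

def stackCost (st : List (Int × Int × Int)) : Nat := (st.map entryCost).sum

-- the A-value of one stack entry, with the exact fuel f gives it
def entryVal (e : Int × Int × Int) : Int := fAux e.1 e.2.1 e.2.2 ((3 - e.2.2).toNat + 1)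

-- ===== LEMMAS AND PROOFS =====

theorem fAux_succ (x y d : Int) (n : Nat) : fAux x y d (n + 1) =
    (if d = 3 ∧ x + y ≥ 91 then 1
    else if d = 3 ∧ x + y < 91 then 0
    else if x + y ≥ 91 ∧ d < 3 then 0
    else if PySem.Int.mod d 2 = 0 then
      pyOr (fAux (x+1) y (d+1) n) (pyOr (fAux x (y+1) (d+1) n)
        (pyOr (fAux (x*4) y (d+1) n) (fAux x (y*4) (d+1) n)))
    else
      pyOr (fAux (x+1) y (d+1) n) (pyOr (fAux x (y+1) (d+1) n)
        (pyOr (fAux (x*4) y (d+1) n) (fAux x (y*4) (d+1) n)))) := rfl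

theorem fStack_succ (n : Nat) (a b d : Int) (rest : List (Int × Int × Int)) :
    fStack (n + 1) ((a, b, d) :: rest) =
    (if d = 3 then
      if a + b ≥ 91 then 1 else fStack n rest
    else if a + b < 91 then
      fStack n ((a+1, b, d+1) :: (a, b+1, d+1) :: (a*4, b, d+1) :: (a, b*4, d+1) :: rest)
    else
      fStack n rest) := rfl

theorem pyOr_01 {a b : Int} (ha : a = 0 ∨ a = 1) (hb : b = 0 ∨ b = 1) :
    pyOr a b = 0 ∨ pyOr a b = 1 := by
  rcases ha with ha | ha <;> rcases hb with hb | hb <;> simp [pyOr, ha, hb]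

theorem pyOr_eq_one {a b : Int} (ha : a = 0 ∨ a = 1) (hb : b = 0 ∨ b = 1) :
    pyOr a b = 1 ↔ (a = 1 ∨ b = 1) := by
  rcases ha with ha | ha <;> rcases hb with hb | hb <;> simp [pyOr, ha, hb]

-- A's recursion only ever produces 0 or 1
theorem fAux_01 (n : Nat) : ∀ (x y d : Int), fAux x y d n = 0 ∨ fAux x y d n = 1 := by
  induction n with
  | zero => intro x y d; left; rfl
  | succ n ih =>
    intro x y d
    rw [fAux_succ]
    split_ifs
    · right; rfl
    · left; rfl
    · left; rfl
    · exact pyOr_01 (ih _ _ _) (pyOr_01 (ih _ _ _) (pyOr_01 (ih _ _ _) (ih _ _ _)))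
    · exact pyOr_01 (ih _ _ _) (pyOr_01 (ih _ _ _) (pyOr_01 (ih _ _ _) (ih _ _ _)))

theorem entryVal_01 (e : Int × Int × Int) : entryVal e = 0 ∨ entryVal e = 1 :=
  fAux_01 _ _ _ _

-- the stack loop computes "some entry has A-value 1", provided enough fuel and every depth ≤ 3
theorem fStack_eq_any (n : Nat) : ∀ (st : List (Int × Int × Int)),
    (∀ e ∈ st, e.2.2 ≤ 3) → stackCost st ≤ n →
    fStack n st = if st.any (fun e => entryVal e = 1) then 1 else 0 := by
  induction n with
  | zero =>
    intro st hd hc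
    cases st with
    | nil => simp [fStack]
    | cons e rest =>
      exfalso
      have h1 : 1 ≤ entryCost e := Nat.one_le_pow _ _ (by norm_num)
      simp [stackCost] at hc
      omega
  | succ n ih =>
    intro st hd hc
    cases st with
    | nil => simp [fStack]
    | cons e rest =>
      obtain ⟨a, b, d⟩ := e
      have hd3 : d ≤ 3 := hd (a, b, d) (by simp)
      have hrest : ∀ e ∈ rest, e.2.2 ≤ 3 := fun e he => hd e (by simp [he])
      have hcost : entryCost (a, b, d) + stackCost rest ≤ n + 1 := by
        simpa [stackCost] using hc
      have h1 : 1 ≤ entryCost (a, b, d) := Nat.one_le_pow _ _ (by norm_num)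
      rw [fStack_succ]
      by_cases h3 : d = 3
      · subst h3
        by_cases hs : a + b ≥ 91
        · have hv : entryVal (a, b, (3:Int)) = 1 := by
            have hf : (3 - (3:Int)).toNat + 1 = 0 + 1 := by norm_num
            show fAux a b 3 ((3 - (3:Int)).toNat + 1) = 1
            rw [hf, fAux_succ, if_pos ⟨rfl, hs⟩]
          simp [hs, hv]
        · have hv : entryVal (a, b, (3:Int)) = 0 := by
            have hf : (3 - (3:Int)).toNat + 1 = 0 + 1 := by norm_num
            show fAux a b 3 ((3 - (3:Int)).toNat + 1) = 0
            rw [hf, fAux_succ, if_neg (fun hc' => hs hc'.2), if_pos ⟨rfl, by omega⟩]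
          rw [if_pos rfl, if_neg hs, ih rest hrest (by omega)]
          simp only [List.any_cons, hv]
          rw [show (decide ((0:Int) = 1)) = false from rfl, Bool.false_or]
      · have hdlt : d < 3 := by omega
        rw [if_neg h3]
        by_cases hs : a + b < 91
        · -- expand into the four children
          rw [if_pos hs]
          have hkey : (4 - d).toNat = (4 - (d+1)).toNat + 1 := by omega
          have hcc : entryCost (a, b, d) = 5 * 5 ^ (4 - (d+1)).toNat := by
            simp only [entryCost]; rw [hkey, pow_succ]; ring
          have hchild : ∀ (p q : Int), entryCost (p, q, d+1) = 5 ^ (4 - (d+1)).toNat := by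
            intro p q; simp [entryCost]
          have h5 : 1 ≤ 5 ^ (4 - (d+1)).toNat := Nat.one_le_pow _ _ (by norm_num)
          have hrc : stackCost rest = (rest.map entryCost).sum := rfl
          have hc' : stackCost ((a+1, b, d+1) :: (a, b+1, d+1) :: (a*4, b, d+1) :: (a, b*4, d+1) :: rest) ≤ n := by
            simp only [stackCost, List.map_cons, List.sum_cons, hchild]
            omega
          have hd' : ∀ e ∈ ((a+1, b, d+1) :: (a, b+1, d+1) :: (a*4, b, d+1) :: (a, b*4, d+1) :: rest),
              e.2.2 ≤ 3 := by
            intro e he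
            simp only [List.mem_cons] at he
            rcases he with rfl | rfl | rfl | rfl | he
            · show d + 1 ≤ 3; omega
            · show d + 1 ≤ 3; omega
            · show d + 1 ≤ 3; omega
            · show d + 1 ≤ 3; omega
            · exact hrest e he
          rw [ih _ hd' hc']
          -- relate entryVal of the parent to the four children via A's body
          have hfuel : (3 - d).toNat + 1 = ((3 - (d+1)).toNat + 1) + 1 := by omega
          have hopen : entryVal (a, b, d) =
              pyOr (entryVal (a+1, b, d+1)) (pyOr (entryVal (a, b+1, d+1))
                (pyOr (entryVal (a*4, b, d+1)) (entryVal (a, b*4, d+1)))) := by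
            show fAux a b d ((3 - d).toNat + 1) = _
            rw [hfuel, fAux_succ,
              if_neg (fun hc' => h3 hc'.1), if_neg (fun hc' => h3 hc'.1),
              if_neg (fun hc' => absurd hc'.1 (by omega))]
            split_ifs <;> rfl
          have hone : (entryVal (a, b, d) = 1) ↔
              (entryVal (a+1, b, d+1) = 1 ∨ entryVal (a, b+1, d+1) = 1 ∨
               entryVal (a*4, b, d+1) = 1 ∨ entryVal (a, b*4, d+1) = 1) := by
            rw [hopen,
              pyOr_eq_one (entryVal_01 _) (pyOr_01 (entryVal_01 _) (pyOr_01 (entryVal_01 _) (entryVal_01 _))),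
              pyOr_eq_one (entryVal_01 _) (pyOr_01 (entryVal_01 _) (entryVal_01 _)),
              pyOr_eq_one (entryVal_01 _) (entryVal_01 _)]
          have hb : (((a+1, b, d+1) :: (a, b+1, d+1) :: (a*4, b, d+1) :: (a, b*4, d+1) :: rest).any
                (fun e => entryVal e = 1))
              = (((a, b, d) :: rest).any (fun e => entryVal e = 1)) := by
            rw [Bool.eq_iff_iff]
            simp only [List.any_cons, Bool.or_eq_true, decide_eq_true_eq]
            rw [hone]
            tauto
          rw [hb]
        · -- pruned: sum ≥ 91 before depth 3
          have hv : entryVal (a, b, d) = 0 := by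
            show fAux a b d ((3 - d).toNat + 1) = 0
            rw [fAux_succ, if_neg (fun hc' => h3 hc'.1), if_neg (fun hc' => h3 hc'.1),
              if_pos ⟨by omega, hdlt⟩]
          rw [if_neg hs, ih rest hrest (by omega)]
          simp only [List.any_cons, hv]
          rw [show (decide ((0:Int) = 1)) = false from rfl, Bool.false_or]

-- ===== VERDICT (by name: the statement is the Claim_ definition above) =====
theorem f_spec : Claim_equal_f := by
  intro x y h_ _ hpre
  unfold Spec_f f f_alt
  have h1 : ∀ e ∈ [(x, y, h_)], (e : Int × Int × Int).2.2 ≤ 3 := by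
    intro e he; simp at he; subst he; exact hpre
  have h2 : stackCost [(x, y, h_)] ≤ 5 ^ (4 - h_).toNat := by
    simp [stackCost, entryCost]
  rw [fStack_eq_any _ _ h1 h2]
  rcases fAux_01 ((3 - h_).toNat + 1) x y h_ with h | h <;>
    simp [show entryVal (x, y, h_) = fAux x y h_ ((3 - h_).toNat + 1) from rfl, h]
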